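-- pv_equiv track=rewrite | github.com/dragoonsouls/TLoD-TMD-Converter | database_to_listbox.py | process_database_from_text_cu
-- ===== SOURCE A (Python) =====
-- def process_database_from_text_cu(text_file=str) -> list:
--     name_scene = []
--     name_objects = []
--     index_insert = []
--     index_place = 0
--     for text in text_file:
--         if f'[/' in text:
--             name_scene_original = text.strip()
--             find_start = name_scene_original.find(f'[')
--             find_end = name_scene_original.find(f']')
--             name_scene_for_listbox = name_scene_original[find_start + 2: find_end]
--             name_scene.append(name_scene_for_listbox)
--             index_insert.append(index_place)
--             name_objects.append(f'index_placeholder')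
--         else:
--             cleaning_text = text.strip()
--             find_colon = cleaning_text.find(f':')
--             find_dash = cleaning_text.find(f' - ')
--             name_object_cu = cleaning_text[:find_colon].strip()
--             model_loc = cleaning_text[find_colon + 1: find_dash].strip()
--             saf_loc = cleaning_text[find_dash + 3: ].strip()
--             objects_complete = name_object_cu, model_loc, saf_loc
--             name_objects.append(objects_complete)
--         index_place += 1
--
--     combined_index = []
--     for index_combine in range(0, len(index_insert)):
--         if index_combine == 0:
--             pass
--         else:
--             start_index = index_insert[index_combine - 1]
--             end_index = index_insert[index_combine]
--             comb_ind = start_index, end_index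
--             combined_index.append(comb_ind)
--
--     final_cutscene_list = []
--     slice_name_scene = 0
--     for get_segments in combined_index:
--         start_segment = get_segments[0]
--         end_segment = get_segments[1]
--         segment = name_objects[start_segment + 1 :end_segment]
--         name_scene_current = name_scene[slice_name_scene]
--         final_current_scene = name_scene_current, segment
--         final_cutscene_list.append(final_current_scene)
--         slice_name_scene += 1
--
--     return final_cutscene_list
-- ===== SOURCE B (Python) =====
-- def process_database_from_text_cu(text_file=str) -> list:
--     # Single pass: keep the currently open scene; a new header flushes the
--     # previous one.  The final (still open) scene is not emitted, and lines
--     # before the first header are ignored, matching the original output.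
--     result = []
--     current = None
--     for text in text_file:
--         if '[/' in text:
--             stripped = text.strip()
--             name = stripped[stripped.find('[') + 2: stripped.find(']')]
--             if current is not None:
--                 result.append(current)
--             current = (name, [])
--         elif current is not None:
--             stripped = text.strip()
--             colon = stripped.find(':')
--             dash = stripped.find(' - ')
--             obj = (stripped[:colon].strip(),
--                    stripped[colon + 1: dash].strip(),
--                    stripped[dash + 3:].strip())
--             current[1].append(obj)
--     return result
-- ===== Notes on version B (the rewrite author's own statement) =====
-- stated objective: simpler
-- what changed: Replaces A's three-phase machinery (per-line lists with an 'index_placeholder' sentinel, a header-index list, adjacent-index pairing and post-hoc slicing) with a single pass that keeps the currently open scene and flushes it when the next header arrives, deliberately never emitting the final open scene.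
import Mathlib
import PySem

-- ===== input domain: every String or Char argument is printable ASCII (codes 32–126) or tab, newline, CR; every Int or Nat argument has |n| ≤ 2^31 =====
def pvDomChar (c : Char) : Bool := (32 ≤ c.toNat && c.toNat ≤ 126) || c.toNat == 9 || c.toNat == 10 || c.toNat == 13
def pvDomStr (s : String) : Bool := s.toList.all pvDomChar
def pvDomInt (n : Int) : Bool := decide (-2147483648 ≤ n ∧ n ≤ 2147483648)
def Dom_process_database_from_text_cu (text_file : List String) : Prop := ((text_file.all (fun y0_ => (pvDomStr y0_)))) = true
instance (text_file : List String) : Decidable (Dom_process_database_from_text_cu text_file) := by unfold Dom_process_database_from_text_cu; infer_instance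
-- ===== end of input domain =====

-- B replaces A's three-phase index/placeholder machinery with one pass keeping the open scene; same return value (alternative decomposition).


-- ===== PORT A =====
-- per-line parsers shared verbatim by both Pythons
def pvIsHdr (text : String) : Bool := PySem.Str.isIn "[/" text      -- '[/' in text

def pvSceneName (text : String) : String :=                         -- header-line name extraction
  let s := PySem.Str.strip text
  let find_start := PySem.Str.find s "["
  let find_end := PySem.Str.find s "]"
  PySem.Str.slice s (some (find_start + 2)) (some find_end)

def pvObjTuple (text : String) : String × String × String :=        -- object-line field extraction
  let s := PySem.Str.strip text
  let find_colon := PySem.Str.find s ":"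
  let find_dash := PySem.Str.find s " - "
  (PySem.Str.strip (PySem.Str.slice s none (some find_colon)),
   PySem.Str.strip (PySem.Str.slice s (some (find_colon + 1)) (some find_dash)),
   PySem.Str.strip (PySem.Str.slice s (some (find_dash + 3)) none))

-- Python's heterogeneous name_objects list (the string 'index_placeholder' at header
-- indices, 3-tuples elsewhere) is typed as Option: none = the placeholder string.
-- Segments lie strictly between consecutive header indices, so they contain no
-- placeholder and '.filterMap id' is exactly the segment's tuples.
def pvStepA (st : List String × List (Option (String × String × String)) × List Int × Int)
    (text : String) : List String × List (Option (String × String × String)) × List Int × Int :=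
  let (name_scene, name_objects, index_insert, index_place) := st
  if pvIsHdr text then
    (name_scene ++ [pvSceneName text], name_objects ++ [none],
     index_insert ++ [index_place], index_place + 1)
  else
    (name_scene, name_objects ++ [some (pvObjTuple text)], index_insert, index_place + 1)

def pvStepC (name_scene : List String)
    (name_objects : List (Option (String × String × String)))
    (st : List (String × List (String × String × String)) × Int)
    (seg : Int × Int) : List (String × List (String × String × String)) × Int :=
  let segment := (PySem.List.slice name_objects (some (seg.1 + 1)) (some seg.2)).filterMap id
  -- name_scene[slice_name_scene] is always in range (one name per header, one fewer index pairs)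
  (st.1 ++ [(PySem.List.pyGetD name_scene st.2 "", segment)], st.2 + 1)

def process_database_from_text_cu (text_file : List String) :
    List (String × (List (String × String × String))) :=
  let st := text_file.foldl pvStepA ([], [], [], 0)
  let name_scene := st.1
  let name_objects := st.2.1
  let index_insert := st.2.2.1
  let combined_index := (PySem.List.pyRange 0 (index_insert.length : Int) 1).foldl
    (fun acc i => if i == 0 then acc
      else acc ++ [(PySem.List.pyGetD index_insert (i - 1) 0, PySem.List.pyGetD index_insert i 0)]) []
  (combined_index.foldl (pvStepC name_scene name_objects) ([], 0)).1

-- ===== PORT B =====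
def pvStepB (st : List (String × List (String × String × String)) ×
      Option (String × List (String × String × String))) (text : String) :
    List (String × List (String × String × String)) ×
      Option (String × List (String × String × String)) :=
  if pvIsHdr text then
    match st.2 with
    | some cur => (st.1 ++ [cur], some (pvSceneName text, []))
    | none => (st.1, some (pvSceneName text, []))
  else
    match st.2 with
    | some cur => (st.1, some (cur.1, cur.2 ++ [pvObjTuple text]))
    | none => (st.1, none)

def process_database_from_text_cu_alt (text_file : List String) :
    List (String × (List (String × String × String))) :=
  (text_file.foldl pvStepB ([], none)).1

-- ===== PRECONDITION & SPEC =====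
def Spec_process_database_from_text_cu (text_file : List String) (out : List (String × (List (String × String × String)))) : Prop := out = process_database_from_text_cu_alt text_file
instance (text_file : List String) (out : List (String × (List (String × String × String)))) : Decidable (Spec_process_database_from_text_cu text_file out) := by unfold Spec_process_database_from_text_cu; infer_instance

-- ===== CLAIM (what is proved, stated in full; the proofs are below) =====
def Claim_equal_process_database_from_text_cu : Prop := ∀ (text_file : List String), Dom_process_database_from_text_cu text_file → Spec_process_database_from_text_cu text_file (process_database_from_text_cu text_file)

-- ===== LEMMAS AND PROOFS =====
-- per-line data of A's first pass, cons-style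
def pvNS : List String → List String
  | [] => []
  | t :: ts => if pvIsHdr t then pvSceneName t :: pvNS ts else pvNS ts

def pvNO : List String → List (Option (String × String × String))
  | [] => []
  | t :: ts => (if pvIsHdr t then none else some (pvObjTuple t)) :: pvNO ts

def pvII : List String → List Nat
  | [] => []
  | t :: ts => if pvIsHdr t then 0 :: (pvII ts).map (· + 1) else (pvII ts).map (· + 1)

def pvSeg (no : List (Option (String × String × String))) (a b : Nat) :
    List (String × String × String) :=
  ((no.drop (a + 1)).take (b - (a + 1))).filterMap id

lemma pv_len_NS_II (ts : List String) : (pvNS ts).length = (pvII ts).length := by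
  induction ts with
  | nil => rfl
  | cons t ts ih => by_cases h : pvIsHdr t <;> simp [pvNS, pvII, h, ih]

lemma pv_foldA_closed (ts : List String) :
    ∀ (ns : List String) (no : List (Option (String × String × String)))
      (ii : List Int) (ip : Int),
    ts.foldl pvStepA (ns, no, ii, ip) =
      (ns ++ pvNS ts, no ++ pvNO ts,
       ii ++ (pvII ts).map (fun k : Nat => (k : Int) + ip), ip + ts.length) := by
  induction ts with
  | nil => intro ns no ii ip; simp [pvNS, pvNO, pvII]
  | cons t ts ih =>
    intro ns no ii ip
    by_cases h : pvIsHdr t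
    · simp only [List.foldl_cons, pvStepA, h, if_true]
      rw [ih]
      refine Prod.ext ?_ (Prod.ext ?_ (Prod.ext ?_ ?_))
      · simp [pvNS, h]
      · simp [pvNO, h]
      · simp only [pvII, h, if_true]
        rw [List.append_assoc]
        refine congrArg (ii ++ ·) ?_
        simp only [List.map_cons, List.map_map, Nat.cast_zero]
        refine List.cons_eq_cons.mpr ⟨by ring, ?_⟩
        apply List.map_congr_left; intro a _; simp only [Function.comp_apply]; push_cast; ring
      · simp only [List.length_cons]; push_cast; ring
    · simp only [List.foldl_cons, pvStepA, h, if_false, Bool.false_eq_true]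
      rw [ih]
      refine Prod.ext ?_ (Prod.ext ?_ (Prod.ext ?_ ?_))
      · simp [pvNS, h]
      · simp [pvNO, h]
      · simp only [pvII, h, if_false, Bool.false_eq_true]
        refine congrArg (ii ++ ·) ?_
        simp only [List.map_map]
        apply List.map_congr_left; intro a _; simp only [Function.comp_apply]; push_cast; ring
      · simp only [List.length_cons]; push_cast; ring

lemma pv_combined_closed (ii : List Int) :
    (PySem.List.pyRange 0 (ii.length : Int) 1).foldl
      (fun acc i => if i == 0 then acc
        else acc ++ [(PySem.List.pyGetD ii (i - 1) 0, PySem.List.pyGetD ii i 0)]) [] =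
    ii.zip ii.tail := by
  have aux : ∀ n : Nat, n ≤ ii.length →
      (PySem.List.pyRange 0 (n : Int) 1).foldl
        (fun acc i => if i == 0 then acc
          else acc ++ [(PySem.List.pyGetD ii (i - 1) 0, PySem.List.pyGetD ii i 0)]) [] =
      (ii.zip ii.tail).take (n - 1) := by
    intro n
    induction n with
    | zero => intro _; simp [PySem.List.pyRange_one_eq_nil]
    | succ m ih =>
      intro hle
      rw [show ((m + 1 : Nat) : Int) = (m : Int) + 1 by push_cast; ring,
        PySem.List.pyRange_one_succ_right (by positivity), List.foldl_append,
        ih (by omega)]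
      match m, hle with
      | 0, _ => simp
      | (k + 1), hle =>
        have hk1 : k + 1 < ii.length := by omega
        have hk : k < ii.length := by omega
        have hzlen : k < (ii.zip ii.tail).length := by
          simp [List.length_zip, List.length_tail]; omega
        simp only [List.foldl_cons, List.foldl_nil]
        rw [if_neg (by simp only [beq_iff_eq]; push_cast; omega)]
        rw [show ((k + 1 : Nat) : Int) - 1 = ((k : Nat) : Int) by push_cast; ring]
        rw [PySem.List.pyGetD_natCast, PySem.List.pyGetD_natCast,
          List.getD_eq_getElem ii 0 hk, List.getD_eq_getElem ii 0 hk1]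
        rw [show k + 1 + 1 - 1 = k + 1 by omega, show k + 1 - 1 = k by omega,
          List.take_add_one, List.getElem?_eq_getElem hzlen]
        simp [List.getElem_zip, List.getElem_tail]
  rw [aux ii.length le_rfl]
  exact List.take_of_length_le (by simp [List.length_zip, List.length_tail])

lemma pv_final_closed (no : List (Option (String × String × String))) :
    ∀ (combined : List (Nat × Nat)) (ns : List String)
      (acc : List (String × List (String × String × String))) (k : Nat),
    k + combined.length ≤ ns.length →
    ((combined.map (fun p => ((p.1 : Int), (p.2 : Int)))).foldl
        (pvStepC ns no) (acc, (k : Int))).1 =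
      acc ++ ((ns.drop k).zip combined).map (fun p => (p.1, pvSeg no p.2.1 p.2.2)) := by
  intro combined
  induction combined with
  | nil => intro ns acc k _; simp
  | cons c cs ih =>
    intro ns acc k hlen
    have hk : k < ns.length := by simp only [List.length_cons] at hlen; omega
    simp only [List.map_cons, List.foldl_cons, pvStepC]
    rw [show ((k : Int) + 1) = ((k + 1 : Nat) : Int) by push_cast; ring]
    rw [ih ns _ (k + 1) (by simp only [List.length_cons] at hlen ⊢; omega)]
    rw [List.drop_eq_getElem_cons hk]
    simp only [List.zip_cons_cons, List.map_cons]
    rw [PySem.List.pyGetD_natCast, List.getD_eq_getElem ns "" hk]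
    rw [show ((c.1 : Int) + 1) = ((c.1 + 1 : Nat) : Int) by push_cast; ring,
      PySem.List.slice_natCast]
    simp [pvSeg, List.append_assoc]

lemma pv_A_closed (tf : List String) :
    process_database_from_text_cu tf =
      ((pvNS tf).zip ((pvII tf).zip (pvII tf).tail)).map
        (fun p => (p.1, pvSeg (pvNO tf) p.2.1 p.2.2)) := by
  have hfold := pv_foldA_closed tf [] [] [] 0
  simp only [List.nil_append] at hfold
  have hmap : (pvII tf).map (fun k : Nat => (k : Int) + 0) =
      (pvII tf).map (fun k : Nat => (k : Int)) := by
    apply List.map_congr_left; intro a _; ring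
  rw [hmap] at hfold
  simp only [process_database_from_text_cu]
  rw [hfold]
  have hzip : ((pvII tf).map (fun k : Nat => (k : Int))).zip
        ((pvII tf).map (fun k : Nat => (k : Int))).tail =
      ((pvII tf).zip (pvII tf).tail).map (fun p => ((p.1 : Int), (p.2 : Int))) := by
    rw [← List.map_tail, List.zip_map]
    apply List.map_congr_left; intro p _; cases p; rfl
  rw [pv_combined_closed, hzip,
    show (0 : Int) = ((0 : Nat) : Int) by simp,
    pv_final_closed (pvNO tf) ((pvII tf).zip (pvII tf).tail) (pvNS tf) [] 0
      (by simp [List.length_zip, List.length_tail, pv_len_NS_II])]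
  simp

lemma pvSeg_cons (x : Option (String × String × String)) (no : List (Option (String × String × String))) (a b : Nat) :
    pvSeg (x :: no) (a + 1) (b + 1) = pvSeg no a b := by
  simp only [pvSeg, List.drop_succ_cons]
  rw [show b + 1 - (a + 1 + 1) = b - (a + 1) by omega]

lemma pv_zip_tail_map_succ (l : List Nat) :
    (l.map (· + 1)).zip (l.map (· + 1)).tail =
      (l.zip l.tail).map (fun p => (p.1 + 1, p.2 + 1)) := by
  rw [← List.map_tail, List.zip_map]
  apply List.map_congr_left; intro p _; cases p; rfl

lemma pv_shift (x : Option (String × String × String)) (no : List (Option (String × String × String)))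
    (ns : List String) (P : List (Nat × Nat)) :
    ((ns.zip (P.map (fun p => (p.1 + 1, p.2 + 1)))).map
        (fun p => (p.1, pvSeg (x :: no) p.2.1 p.2.2))) =
      (ns.zip P).map (fun p => (p.1, pvSeg no p.2.1 p.2.2)) := by
  rw [List.zip_map_right, List.map_map]
  apply List.map_congr_left; intro p _
  obtain ⟨n, a, b⟩ := p
  simp [Prod.map, pvSeg_cons]

lemma pv_A_notHdr (t : String) (ts : List String) (h : pvIsHdr t = false) :
    process_database_from_text_cu (t :: ts) = process_database_from_text_cu ts := by
  rw [pv_A_closed, pv_A_closed]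
  simp only [pvNS, pvNO, pvII, h, if_false, Bool.false_eq_true]
  rw [pv_zip_tail_map_succ, pv_shift]

lemma pv_A_hdr_nil (t : String) (ts : List String) (h : pvIsHdr t = true)
    (h2 : pvII ts = []) : process_database_from_text_cu (t :: ts) = [] := by
  rw [pv_A_closed]
  simp [pvNS, pvNO, pvII, h, h2]

lemma pv_A_hdr_cons (t : String) (ts : List String) (h : pvIsHdr t = true)
    (a : Nat) (rest : List Nat) (h2 : pvII ts = a :: rest) :
    process_database_from_text_cu (t :: ts) =
      (pvSceneName t, ((pvNO ts).take a).filterMap id) :: process_database_from_text_cu ts := by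
  rw [pv_A_closed (t :: ts), pv_A_closed ts]
  simp only [pvNS, pvNO, pvII, h, if_true, h2, List.map_cons, List.tail_cons,
    List.zip_cons_cons]
  rw [show ((a + 1 : Nat) :: rest.map (· + 1)) = (a :: rest).map (· + 1) from rfl,
    show rest.map (· + 1) = ((a :: rest).map (· + 1)).tail from rfl,
    pv_zip_tail_map_succ, pv_shift]
  simp only [List.tail_cons]
  refine congrArg₂ List.cons ?_ rfl
  simp [pvSeg]

lemma pv_B_some (ts : List String) :
    ∀ (res : List (String × List (String × String × String))) (n : String)
      (objs : List (String × String × String)),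
    (ts.foldl pvStepB (res, some (n, objs))).1 =
      res ++ (match pvII ts with
        | [] => []
        | a :: _ => (n, objs ++ ((pvNO ts).take a).filterMap id) ::
            process_database_from_text_cu ts) := by
  induction ts with
  | nil => intro res n objs; simp [pvII]
  | cons t ts ih =>
    intro res n objs
    by_cases h : pvIsHdr t
    · simp only [List.foldl_cons, pvStepB, h, if_true]
      rw [ih]
      simp only [pvII, pvNO, h, if_true]
      cases h2 : pvII ts with
      | nil => rw [pv_A_hdr_nil t ts h h2]; simp
      | cons a rest =>
        rw [pv_A_hdr_cons t ts h a rest h2]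
        simp [List.append_assoc]
    · simp only [List.foldl_cons, pvStepB, h, if_false, Bool.false_eq_true]
      rw [ih, pv_A_notHdr t ts (by simpa using h)]
      simp only [pvII, pvNO, h, if_false, Bool.false_eq_true]
      cases h2 : pvII ts with
      | nil => simp
      | cons a rest => simp [List.append_assoc]

lemma pv_main (tf : List String) :
    process_database_from_text_cu tf = process_database_from_text_cu_alt tf := by
  induction tf with
  | nil => rfl
  | cons t ts ih =>
    by_cases h : pvIsHdr t
    · simp only [process_database_from_text_cu_alt, List.foldl_cons, pvStepB, h, if_true]
      rw [pv_B_some]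
      cases h2 : pvII ts with
      | nil => rw [pv_A_hdr_nil t ts h h2]; simp
      | cons a rest => rw [pv_A_hdr_cons t ts h a rest h2]; simp
    · rw [pv_A_notHdr t ts (by simpa using h), ih]
      simp only [process_database_from_text_cu_alt, List.foldl_cons, pvStepB, h,
        if_false, Bool.false_eq_true]

-- ===== VERDICT (by name: the statement is the Claim_ definition above) =====
theorem process_database_from_text_cu_spec : Claim_equal_process_database_from_text_cu := by
  intro tf _
  unfold Spec_process_database_from_text_cu
  exact pv_main tf
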